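-- pv_equiv track=rewrite | github.com/tdettling/Lights_Out | MatrixReduction.py | combineComponents
-- ===== SOURCE A (Python) =====
-- def combineComponents(graph_list):
--     """Constructs a graph whose connected components are the graphs in the list "graph_list"."""
--     current_graph = graph_list[0] # Set the current graph equal to the first graph in the list of connected components.
--     for k in range(1,len(graph_list)): # Look through all the remaining connected components.
--         interim_graph = dict() # Initialize the graph we use to adjust the vertices and add in the new graph.
--         current_component = graph_list[k] # Set current_component equal to the connected component currently being worked with.
--         for vertex in current_graph: # Take each vertex in the current graph with the purpose of increasing each vertex to make room for the vertices in the current component.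
--             new_vertex = vertex + len(current_component) # "new_vertex" is the new name for the vertex "vertex".
--             interim_graph[new_vertex] = list()
--             for adjacent_vertex in current_graph[vertex]: # Look at each vertex adjacent to "vertex".  We want to increase them, too.
--                 new_adjacent_vertex = adjacent_vertex + len(current_component) # We increase adjacent vertices to match their new identity.
--                 interim_graph[new_vertex].append(new_adjacent_vertex) # Change old vertices into new vertices.
--         interim_graph.update(current_component) # Include the current component in the interim graph, and make this the current graph.
--         current_graph = interim_graph
--     return current_graph
-- ===== SOURCE B (Python) =====
-- def combineComponents(graph_list):
--     """Constructs a graph whose connected components are the graphs in the list "graph_list"."""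
--     # One pass: each component is emitted once, shifted by the total size of all later components.
--     offset = sum(len(g) for g in graph_list)
--     result = {}
--     for g in graph_list:
--         offset -= len(g)
--         for v, adj in g.items():
--             result[v + offset] = [a + offset for a in adj]
--     return result
-- ===== Notes on version B (the rewrite author's own statement) =====
-- stated objective: faster
-- what changed: Instead of re-shifting the whole accumulated graph by the new component's size at every merge step, B computes each component's final offset (the total size of all later components, via one running suffix sum) and emits every vertex exactly once.
import Mathlib
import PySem

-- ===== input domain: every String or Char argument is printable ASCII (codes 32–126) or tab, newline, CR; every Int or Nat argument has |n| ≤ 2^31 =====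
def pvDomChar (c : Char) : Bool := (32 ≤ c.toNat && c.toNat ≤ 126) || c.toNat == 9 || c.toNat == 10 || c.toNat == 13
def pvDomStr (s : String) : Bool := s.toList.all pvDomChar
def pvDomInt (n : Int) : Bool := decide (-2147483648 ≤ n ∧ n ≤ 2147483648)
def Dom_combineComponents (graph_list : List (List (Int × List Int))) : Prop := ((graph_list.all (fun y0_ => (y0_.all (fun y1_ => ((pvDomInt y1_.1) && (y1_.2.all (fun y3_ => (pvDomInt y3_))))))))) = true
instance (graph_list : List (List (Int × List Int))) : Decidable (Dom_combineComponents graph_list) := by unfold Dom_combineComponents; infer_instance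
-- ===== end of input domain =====

-- B replaces A's repeated re-shifting of the whole accumulated graph by a single pass that
-- emits each component once, shifted by a running suffix-sum offset.

-- ===== PORT A =====
def combineComponents (graph_list : List (List (Int × List Int))) : List (Int × List Int) :=
  match graph_list with
  | [] => []  -- Python raises IndexError at graph_list[0]; excluded by Pre_
  | g0 :: rest =>
      (rest.foldl
        (fun current comp0 =>
          let comp : PySem.Dict Int (List Int) := PySem.Dict.ofList comp0
          let interim :=
            current.items.foldl
              (fun ig p =>
                let new_vertex := p.1 + (comp.size : Int)
                let ig1 := ig.insert new_vertex []
                p.2.foldl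
                  (fun ig2 a => ig2.modify new_vertex [] (fun l => l ++ [a + (comp.size : Int)]))
                  ig1)
              PySem.Dict.empty
          interim.update comp.items)
        (PySem.Dict.ofList g0)).items

-- ===== PORT B =====
def combineComponents_alt (graph_list : List (List (Int × List Int))) : List (Int × List Int) :=
  let total : Int :=
    (graph_list.map (fun g => ((PySem.Dict.ofList g : PySem.Dict Int (List Int)).size : Int))).sum
  ((graph_list.foldl
      (fun (st : Int × PySem.Dict Int (List Int)) g =>
        let d : PySem.Dict Int (List Int) := PySem.Dict.ofList g
        let off := st.1 - (d.size : Int)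
        (off, d.items.foldl (fun r q => r.insert (q.1 + off) (q.2.map (fun a => a + off))) st.2))
      (total, PySem.Dict.empty)).2).items

-- ===== PRECONDITION & SPEC =====
-- Pre_ excludes only the empty list, on which A raises IndexError.
def Pre_combineComponents (graph_list : List (List (Int × List Int))) : Prop := graph_list ≠ []
instance (graph_list : List (List (Int × List Int))) : Decidable (Pre_combineComponents graph_list) := by unfold Pre_combineComponents; infer_instance
def pvWitness_combineComponents : (List (List (Int × List Int))) := [[(0, [1]), (1, [0])], [(0, [])]]

def Spec_combineComponents (graph_list : List (List (Int × List Int))) (out : List (Int × List Int)) : Prop := out = combineComponents_alt graph_list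
instance (graph_list : List (List (Int × List Int))) (out : List (Int × List Int)) : Decidable (Spec_combineComponents graph_list out) := by unfold Spec_combineComponents; infer_instance

-- ===== CLAIM (what is proved, stated in full; the proofs are below) =====
def Claim_equal_combineComponents : Prop := ∀ (graph_list : List (List (Int × List Int))), Dom_combineComponents graph_list → Pre_combineComponents graph_list → Spec_combineComponents graph_list (combineComponents graph_list)

-- ===== LEMMAS AND PROOFS =====

-- shift of one adjacency entry / of an items list / of a whole dict; component sizes; and the
-- canonical form both ports reduce to: fold the components in, each with its suffix offset (+ δ)
def pvShiftP (δ : Int) (p : Int × List Int) : Int × List Int := (p.1 + δ, p.2.map (fun a => a + δ))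
def pvShiftL (δ : Int) (l : List (Int × List Int)) : List (Int × List Int) := l.map (pvShiftP δ)
def pvShiftD (δ : Int) (d : PySem.Dict Int (List Int)) : PySem.Dict Int (List Int) :=
  PySem.Dict.mk (pvShiftL δ d.items)
def pvLen (g : List (Int × List Int)) : Int := ((PySem.Dict.ofList g : PySem.Dict Int (List Int)).size : Int)
def pvTot (gl : List (List (Int × List Int))) : Int := (gl.map pvLen).sum
def pvCanon (δ : Int) (gl : List (List (Int × List Int))) (d : PySem.Dict Int (List Int)) :
    PySem.Dict Int (List Int) :=
  match gl with
  | [] => d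
  | g :: rest => pvCanon δ rest (d.update (pvShiftL (pvTot rest + δ) g))

-- the two ports' loop bodies, as named functions (definitionally equal to the lambdas in the ports)
def pvAStep (current : PySem.Dict Int (List Int)) (comp0 : List (Int × List Int)) :
    PySem.Dict Int (List Int) :=
  (current.items.foldl
      (fun ig p =>
        p.2.foldl (fun ig2 a => ig2.modify (p.1 + pvLen comp0) [] (fun l => l ++ [a + pvLen comp0]))
          (ig.insert (p.1 + pvLen comp0) []))
      PySem.Dict.empty).update (PySem.Dict.ofList comp0 : PySem.Dict Int (List Int)).items

def pvBStep (st : Int × PySem.Dict Int (List Int)) (g : List (Int × List Int)) :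
    Int × PySem.Dict Int (List Int) :=
  (st.1 - pvLen g,
    (PySem.Dict.ofList g : PySem.Dict Int (List Int)).items.foldl
      (fun r q => r.insert (q.1 + (st.1 - pvLen g)) (q.2.map (fun a => a + (st.1 - pvLen g)))) st.2)

-- A's inner append loop leaves the entry at new_vertex holding the shifted adjacency list
theorem pv_modify_loop (adj : List Int) (L nv : Int) (acc : List Int) (d : PySem.Dict Int (List Int)) :
    adj.foldl (fun ig2 a => ig2.modify nv [] (fun l => l ++ [a + L])) (d.insert nv acc)
      = d.insert nv (acc ++ adj.map (fun a => a + L)) := by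
  induction adj generalizing acc with
  | nil => simp
  | cons a adj ih =>
      have h1 : ((d.insert nv acc).modify nv [] (fun l => l ++ [a + L]))
          = d.insert nv (acc ++ [a + L]) := by
        simp [PySem.Dict.modify, PySem.Dict.getD_insert_self, PySem.Dict.insert_insert_self]
      rw [List.foldl_cons, h1, ih (acc ++ [a + L])]
      simp

-- A's interim-graph loop builds exactly the dict of the shifted items
theorem pv_interim_eq (L : Int) (cur : List (Int × List Int)) :
    cur.foldl
      (fun ig p =>
        p.2.foldl (fun ig2 a => ig2.modify (p.1 + L) [] (fun l => l ++ [a + L]))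
          (ig.insert (p.1 + L) []))
      PySem.Dict.empty
      = PySem.Dict.ofList (cur.map (fun p => (p.1 + L, p.2.map (fun a => a + L)))) := by
  have hb : (fun (ig : PySem.Dict Int (List Int)) (p : Int × List Int) =>
      p.2.foldl (fun ig2 a => ig2.modify (p.1 + L) [] (fun l => l ++ [a + L]))
        (ig.insert (p.1 + L) []))
      = fun ig p => ig.insert (p.1 + L) (p.2.map (fun a => a + L)) := by
    funext ig p
    simpa using pv_modify_loop p.2 L (p.1 + L) [] ig
  rw [hb]
  show _ = PySem.Dict.update _ _
  simp only [PySem.Dict.update, List.foldl_map]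

theorem pv_ofList_nodup (l : List (Int × List Int)) (h : (l.map Prod.fst).Nodup) :
    (PySem.Dict.ofList l : PySem.Dict Int (List Int)) = PySem.Dict.mk l := by
  apply PySem.Dict.ext
  show (PySem.Dict.update _ _).items = _
  rw [PySem.Dict.update]
  rw [PySem.Dict.items_foldl_insert_fresh l Prod.fst Prod.snd PySem.Dict.empty
    (by intro a _; simp [PySem.Dict.contains_empty]) h]
  simp [PySem.Dict.empty]

theorem pv_keys_shiftD (δ : Int) (d : PySem.Dict Int (List Int)) :
    (pvShiftD δ d).keys = d.keys.map (fun x => x + δ) := by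
  show List.map _ (List.map _ _) = List.map _ (List.map _ _)
  simp only [List.map_map]
  rfl

theorem pv_contains_shiftD (δ : Int) (d : PySem.Dict Int (List Int)) (k : Int) :
    (pvShiftD δ d).contains (k + δ) = d.contains k := by
  rw [PySem.Dict.contains_eq_decide_mem_keys, PySem.Dict.contains_eq_decide_mem_keys,
    pv_keys_shiftD]
  by_cases h : k ∈ d.keys
  · simp only [h, decide_true, decide_eq_true_eq]
    exact List.mem_map.mpr ⟨k, h, rfl⟩
  · simp only [h, decide_false, decide_eq_false_iff_not, List.mem_map]
    rintro ⟨x, hx, heq⟩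
    exact h ((by omega : x = k) ▸ hx)

-- shifting all labels by δ commutes with every dict operation the ports perform
theorem pv_shiftD_insert (δ : Int) (d : PySem.Dict Int (List Int)) (k : Int) (v : List Int) :
    pvShiftD δ (d.insert k v) = (pvShiftD δ d).insert (k + δ) (v.map (fun a => a + δ)) := by
  apply PySem.Dict.ext
  show pvShiftL δ (d.insert k v).items = _
  rw [PySem.Dict.items_insert, PySem.Dict.items_insert, pv_contains_shiftD]
  by_cases h : d.contains k = true
  · simp only [h, if_true]
    show List.map _ (List.map _ _) = List.map _ (List.map _ _)
    simp only [List.map_map]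
    apply List.map_congr_left
    intro p _
    by_cases hp : p.1 = k
    · simp [Function.comp, hp, pvShiftP]
    · have h1 : (p.1 == k) = false := by simp [hp]
      have h2 : (p.1 + δ == k + δ) = false := by simp; omega
      simp [Function.comp, h1, pvShiftP, h2]
  · simp only [h, if_false, Bool.false_eq_true]
    show List.map _ (_ ++ _) = _ ++ _
    simp only [List.map_append]
    rfl

theorem pv_shiftD_update (δ : Int) (d : PySem.Dict Int (List Int)) (l : List (Int × List Int)) :
    pvShiftD δ (d.update l) = (pvShiftD δ d).update (pvShiftL δ l) := by
  induction l generalizing d with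
  | nil => rfl
  | cons x l ih =>
      show pvShiftD δ ((d.insert x.1 x.2).update l) = _
      rw [ih, pv_shiftD_insert]
      rfl

theorem pv_shiftD_shiftD (δ₁ δ₂ : Int) (d : PySem.Dict Int (List Int)) :
    pvShiftD δ₂ (pvShiftD δ₁ d) = pvShiftD (δ₁ + δ₂) d := by
  apply PySem.Dict.ext
  show List.map _ (List.map _ _) = _
  simp only [List.map_map]
  apply List.map_congr_left
  intro p _
  simp [Function.comp, pvShiftP, List.map_map, add_assoc]

theorem pv_shiftD_zero (d : PySem.Dict Int (List Int)) : pvShiftD 0 d = d := by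
  apply PySem.Dict.ext
  show List.map (pvShiftP 0) d.items = d.items
  have h : ∀ p ∈ d.items, pvShiftP 0 p = id p := by
    intro p _; simp [pvShiftP]
  rw [List.map_congr_left h, List.map_id]

theorem pv_nodup_keys_shiftD (δ : Int) (d : PySem.Dict Int (List Int)) (h : d.keys.Nodup) :
    (pvShiftD δ d).keys.Nodup := by
  rw [pv_keys_shiftD]
  exact h.map (fun a b hab => by omega)

theorem pv_shiftD_ofList (δ : Int) (g : List (Int × List Int)) :
    pvShiftD δ (PySem.Dict.ofList g) = PySem.Dict.ofList (pvShiftL δ g) := by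
  have h0 : (PySem.Dict.ofList g : PySem.Dict Int (List Int)) = PySem.Dict.empty.update g := rfl
  rw [h0, pv_shiftD_update]
  have h1 : pvShiftD δ PySem.Dict.empty = PySem.Dict.empty := by
    apply PySem.Dict.ext; rfl
  rw [h1]
  rfl

-- two inserts at distinct keys commute when the first key is already present (both overwrite in place)
theorem pv_insert_comm (d : PySem.Dict Int (List Int)) (k k' : Int) (v w : List Int)
    (hne : k' ≠ k) (hk : d.contains k = true) :
    (d.insert k' w).insert k v = (d.insert k v).insert k' w := by
  apply PySem.Dict.ext
  have hk1 : (d.insert k' w).contains k = true := by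
    rw [PySem.Dict.contains_insert]; simp [hk]
  by_cases h' : d.contains k' = true
  · have h'1 : (d.insert k v).contains k' = true := by
      rw [PySem.Dict.contains_insert]; simp [h']
    rw [PySem.Dict.items_insert_of_contains _ v hk1,
        PySem.Dict.items_insert_of_contains _ w h',
        PySem.Dict.items_insert_of_contains _ w h'1,
        PySem.Dict.items_insert_of_contains _ v hk]
    simp only [List.map_map]
    apply List.map_congr_left
    intro p _
    by_cases h1 : p.1 = k
    · simp [Function.comp, h1, (by simp; omega : ((k:Int) == k') = false)]
    · by_cases h2 : p.1 = k'
      · simp [Function.comp, h2, (by simp; omega : ((k':Int) == k) = false)]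
      · simp [Function.comp, (by simp [h1] : (p.1 == k) = false), (by simp [h2] : (p.1 == k') = false)]
  · have h'0 : d.contains k' = false := by simpa using h'
    have h'1 : (d.insert k v).contains k' = false := by
      rw [PySem.Dict.contains_insert]
      simp [h'0]; omega
    rw [PySem.Dict.items_insert_of_contains _ v hk1,
        PySem.Dict.items_insert_of_not_contains _ w h'0,
        PySem.Dict.items_insert_of_not_contains _ w h'1,
        PySem.Dict.items_insert_of_contains _ v hk]
    simp only [List.map_append]
    congr 1
    have hb : ((k':Int) == k) = false := by simp [hne]
    simp only [List.map_cons, List.map_nil, hb, Bool.false_eq_true, if_false]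

theorem pv_insert_update (d : PySem.Dict Int (List Int)) (l : List (Int × List Int)) (k : Int)
    (v : List Int) (hk : d.contains k = true) (hnot : k ∉ l.map Prod.fst) :
    (d.update l).insert k v = (d.insert k v).update l := by
  induction l generalizing d with
  | nil => rfl
  | cons x l ih =>
      show ((d.insert x.1 x.2).update l).insert k v = ((d.insert k v).insert x.1 x.2).update l
      have hx : x.1 ≠ k := by
        intro he; exact hnot (by simp [he])
      have hk' : (d.insert x.1 x.2).contains k = true := by
        rw [PySem.Dict.contains_insert]; simp [hk]
      rw [ih _ hk' (by intro h; exact hnot (by simp [h])),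
          pv_insert_comm d k x.1 v x.2 hx hk]

theorem pv_update_map_ow (l : List (Int × List Int)) (k : Int) (v : List Int)
    (d : PySem.Dict Int (List Int)) (hnd : (l.map Prod.fst).Nodup) (hmem : k ∈ l.map Prod.fst) :
    d.update (l.map (fun p => if (p.1 == k) = true then (k, v) else p)) = (d.update l).insert k v := by
  induction l generalizing d with
  | nil => simp at hmem
  | cons x l ih =>
      simp only [List.map_cons, List.nodup_cons] at hnd
      by_cases hx : x.1 = k
      · have hrest : ∀ p ∈ l, (fun p => if (p.1 == k) = true then (k, v) else p) p = id p := by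
          intro p hp
          have : p.1 ≠ k := by
            intro he; exact hnd.1 (hx ▸ he ▸ List.mem_map_of_mem hp)
          simp [this]
        rw [List.map_cons]
        rw [show (if (x.1 == k) = true then ((k : Int), v) else x) = (k, v) from by simp [hx]]
        show (d.insert k v).update (l.map _) = _
        rw [List.map_congr_left hrest, List.map_id]
        show (d.insert k v).update l = ((d.insert x.1 x.2).update l).insert k v
        have hknotl : k ∉ l.map Prod.fst := by
          intro h; exact hnd.1 (hx ▸ h)
        rw [pv_insert_update _ _ _ _ (by rw [PySem.Dict.contains_insert]; simp [hx]) hknotl,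
          hx, PySem.Dict.insert_insert_self]
      · have hmem' : k ∈ l.map Prod.fst := by
          rcases List.mem_cons.mp hmem with h | h
          · exact absurd h.symm hx
          · exact h
        rw [List.map_cons]
        rw [show (if (x.1 == k) = true then ((k:Int), v) else x) = x from by simp [hx]]
        show (d.insert x.1 x.2).update (l.map _) = _
        rw [ih _ hnd.2 hmem']
        rfl

theorem pv_update_insert_items (d e : PySem.Dict Int (List Int)) (k : Int) (v : List Int)
    (hnd : e.keys.Nodup) :
    d.update (e.insert k v).items = (d.update e.items).insert k v := by
  by_cases h : e.contains k = true
  · rw [PySem.Dict.items_insert_of_contains _ v h]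
    apply pv_update_map_ow _ _ _ _ hnd
    rw [PySem.Dict.contains_eq_decide_mem_keys] at h
    simpa [PySem.Dict.keys] using of_decide_eq_true h
  · rw [PySem.Dict.items_insert_of_not_contains _ v (by simpa using h)]
    simp only [PySem.Dict.update, List.foldl_append]
    rfl

theorem pv_update_update_items (c : List (Int × List Int)) (d e : PySem.Dict Int (List Int))
    (hnd : e.keys.Nodup) :
    d.update (e.update c).items = (d.update e.items).update c := by
  induction c generalizing e with
  | nil => rfl
  | cons x c ih =>
      show d.update ((e.insert x.1 x.2).update c).items = _
      rw [ih _ (PySem.Dict.nodup_keys_insert e x.1 x.2 hnd),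
          pv_update_insert_items d e x.1 x.2 hnd]
      rfl

-- python's dict.update(other_dict) applied to our association lists: the dedup can be dropped
theorem pv_update_ofList_items (d : PySem.Dict Int (List Int)) (c : List (Int × List Int)) :
    d.update (PySem.Dict.ofList c : PySem.Dict Int (List Int)).items = d.update c := by
  have := pv_update_update_items c d PySem.Dict.empty PySem.Dict.nodup_keys_empty
  simpa [PySem.Dict.empty] using this

-- A's merge loop, characterised: the accumulated graph is the canonical suffix-offset merge
theorem pv_A_loop (rest : List (List (Int × List Int))) (cur : PySem.Dict Int (List Int))
    (h : cur.keys.Nodup) :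
    rest.foldl
      (fun current comp0 =>
        let comp : PySem.Dict Int (List Int) := PySem.Dict.ofList comp0
        let interim :=
          current.items.foldl
            (fun ig p =>
              let new_vertex := p.1 + (comp.size : Int)
              let ig1 := ig.insert new_vertex []
              p.2.foldl
                (fun ig2 a => ig2.modify new_vertex [] (fun l => l ++ [a + (comp.size : Int)]))
                ig1)
            PySem.Dict.empty
        interim.update comp.items)
      cur
      = pvCanon 0 rest (pvShiftD (pvTot rest) cur) := by
  have hfun : (fun (current : PySem.Dict Int (List Int)) comp0 =>
      let comp : PySem.Dict Int (List Int) := PySem.Dict.ofList comp0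
      let interim :=
        current.items.foldl
          (fun ig p =>
            let new_vertex := p.1 + (comp.size : Int)
            let ig1 := ig.insert new_vertex []
            p.2.foldl
              (fun ig2 a => ig2.modify new_vertex [] (fun l => l ++ [a + (comp.size : Int)]))
              ig1)
          PySem.Dict.empty
      interim.update comp.items) = pvAStep := by
    funext current comp0; rfl
  rw [hfun]
  induction rest generalizing cur with
  | nil =>
      show cur = pvCanon 0 [] (pvShiftD (pvTot []) cur)
      show cur = pvShiftD (pvTot []) cur
      have : pvTot [] = 0 := rfl
      rw [this, pv_shiftD_zero]
  | cons c rest ih =>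
      rw [List.foldl_cons]
      have hstep : pvAStep cur c = (pvShiftD (pvLen c) cur).update c := by
        show (cur.items.foldl
            (fun ig p =>
              p.2.foldl (fun ig2 a => ig2.modify (p.1 + pvLen c) [] (fun l => l ++ [a + pvLen c]))
                (ig.insert (p.1 + pvLen c) []))
            PySem.Dict.empty).update (PySem.Dict.ofList c : PySem.Dict Int (List Int)).items = _
        rw [pv_interim_eq (pvLen c) cur.items, pv_update_ofList_items]
        have hkeys : ((cur.items.map (fun p => (p.1 + pvLen c, p.2.map (fun a => a + pvLen c)))).map
            Prod.fst).Nodup := by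
          have he : (cur.items.map (fun p => (p.1 + pvLen c, p.2.map (fun a => a + pvLen c)))).map
              Prod.fst = cur.keys.map (fun x => x + pvLen c) := by
            simp only [List.map_map, PySem.Dict.keys]
            rfl
          rw [he]
          exact h.map (fun a b hab => by omega)
        rw [pv_ofList_nodup _ hkeys]
        rfl
      rw [hstep, ih _ (PySem.Dict.nodup_keys_update _ _ (pv_nodup_keys_shiftD _ _ h))]
      show pvCanon 0 rest (pvShiftD (pvTot rest) ((pvShiftD (pvLen c) cur).update c))
          = pvCanon 0 rest ((pvShiftD (pvTot (c :: rest)) cur).update (pvShiftL (pvTot rest + 0) c))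
      rw [pv_shiftD_update, pv_shiftD_shiftD]
      have h1 : pvLen c + pvTot rest = pvTot (c :: rest) := by simp [pvTot]
      have h2 : pvTot rest + 0 = pvTot rest := by ring
      rw [h1, h2]

-- B's single pass, characterised by the same canonical form
theorem pv_B_loop (gl : List (List (Int × List Int))) (δ : Int) (r : PySem.Dict Int (List Int)) :
    (gl.foldl
        (fun (st : Int × PySem.Dict Int (List Int)) g =>
          let d : PySem.Dict Int (List Int) := PySem.Dict.ofList g
          let off := st.1 - (d.size : Int)
          (off, d.items.foldl (fun r q => r.insert (q.1 + off) (q.2.map (fun a => a + off))) st.2))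
        (pvTot gl + δ, r)).2
      = pvCanon δ gl r := by
  have hfun : (fun (st : Int × PySem.Dict Int (List Int)) g =>
      let d : PySem.Dict Int (List Int) := PySem.Dict.ofList g
      let off := st.1 - (d.size : Int)
      (off, d.items.foldl (fun r q => r.insert (q.1 + off) (q.2.map (fun a => a + off))) st.2))
      = pvBStep := by
    funext st g; rfl
  rw [hfun]
  induction gl generalizing δ r with
  | nil => rfl
  | cons g rest ih =>
      rw [List.foldl_cons]
      have hoff : pvTot (g :: rest) + δ - pvLen g = pvTot rest + δ := by simp [pvTot]; ring
      have hstep : pvBStep (pvTot (g :: rest) + δ, r) g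
          = (pvTot rest + δ, r.update (pvShiftL (pvTot rest + δ) g)) := by
        show ((pvTot (g :: rest) + δ - pvLen g),
            (PySem.Dict.ofList g : PySem.Dict Int (List Int)).items.foldl
              (fun r q => r.insert (q.1 + (pvTot (g :: rest) + δ - pvLen g))
                (q.2.map (fun a => a + (pvTot (g :: rest) + δ - pvLen g)))) r)
          = _
        rw [hoff]
        have hupd : (PySem.Dict.ofList g : PySem.Dict Int (List Int)).items.foldl
              (fun r q => r.insert (q.1 + (pvTot rest + δ)) (q.2.map (fun a => a + (pvTot rest + δ)))) r
            = r.update (pvShiftL (pvTot rest + δ) (PySem.Dict.ofList g :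
                PySem.Dict Int (List Int)).items) := by
          show _ = List.foldl _ r (List.map (pvShiftP (pvTot rest + δ)) _)
          rw [List.foldl_map]
          rfl
        rw [hupd]
        have he : pvShiftL (pvTot rest + δ) (PySem.Dict.ofList g : PySem.Dict Int (List Int)).items
            = (PySem.Dict.ofList (pvShiftL (pvTot rest + δ) g) :
                PySem.Dict Int (List Int)).items := by
          calc pvShiftL (pvTot rest + δ) (PySem.Dict.ofList g :
                PySem.Dict Int (List Int)).items
              = (pvShiftD (pvTot rest + δ) (PySem.Dict.ofList g)).items := rfl
            _ = _ := by rw [pv_shiftD_ofList]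
        rw [he, pv_update_ofList_items]
      rw [hstep, ih]
      rfl

-- ===== VERDICT (by name: the statement is the Claim_ definition above) =====
theorem combineComponents_spec : Claim_equal_combineComponents := by
  unfold Claim_equal_combineComponents
  intro gl _ hpre
  unfold Spec_combineComponents
  match gl with
  | [] => exact absurd rfl hpre
  | g0 :: rest =>
      have hA : combineComponents (g0 :: rest)
          = (pvCanon 0 rest (pvShiftD (pvTot rest) (PySem.Dict.ofList g0))).items := by
        show (rest.foldl _ (PySem.Dict.ofList g0)).items = _
        rw [pv_A_loop rest _ (PySem.Dict.nodup_keys_ofList g0)]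
      have hB : combineComponents_alt (g0 :: rest)
          = (pvCanon 0 (g0 :: rest) PySem.Dict.empty).items := by
        have h := pv_B_loop (g0 :: rest) 0 PySem.Dict.empty
        rw [show pvTot (g0 :: rest) + (0 : Int) = pvTot (g0 :: rest) from by ring] at h
        exact congrArg PySem.Dict.items h
      have hbridge : pvCanon 0 (g0 :: rest) PySem.Dict.empty
          = pvCanon 0 rest (pvShiftD (pvTot rest) (PySem.Dict.ofList g0)) := by
        show pvCanon 0 rest (PySem.Dict.empty.update (pvShiftL (pvTot rest + 0) g0)) = _
        rw [show pvTot rest + (0 : Int) = pvTot rest from by ring, pv_shiftD_ofList]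
        rfl
      rw [hA, hB, hbridge]
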